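-- pv_equiv track=rewrite | github.com/Carmello03/staffing-demand-forecast | backend/app/model.py | _pretty_feature_name
-- ===== SOURCE A (Python) =====
-- def _pretty_feature_name(name: str) -> str:
--     core = name
--     if core.startswith("num__"):
--         core = core[5:]
--     elif core.startswith("cat__"):
--         core = core[5:]
--
--     for cat_field in ["StoreType", "Assortment", "StateHoliday", "PromoInterval", "Store"]:
--         prefix = cat_field + "_"
--         if core.startswith(prefix):
--             return f"{cat_field} = {core[len(prefix):]}"
--
--     return core.replace("_", " ")
-- ===== SOURCE B (Python) =====
-- _FIELDS = {"StoreType", "Assortment", "StateHoliday", "PromoInterval", "Store"}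
--
--
-- def _pretty_feature_name(name: str) -> str:
--     # One left-to-right pass over the characters with a small state machine,
--     # instead of staged startswith/slice/replace passes.
--     core = name[5:] if name[:5] in ("num__", "cat__") else name
--     head = []          # chars seen before the first underscore
--     out = []
--     mode = 0           # 0 = reading head, 1 = copy verbatim, 2 = map '_' -> ' '
--     for ch in core:
--         if mode == 0:
--             if ch == "_":
--                 h = "".join(head)
--                 if h in _FIELDS:
--                     out = [h, " = "]
--                     mode = 1
--                 else:
--                     out = [h, " "]
--                     mode = 2
--             else:
--                 head.append(ch)
--         elif mode == 1:
--             out.append(ch)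
--         else:
--             out.append(" " if ch == "_" else ch)
--     if mode == 0:
--         return "".join(head)
--     return "".join(out)
-- ===== Notes on version B (the rewrite author's own statement) =====
-- stated objective: alternative
-- what changed: Replaces A's staged passes (a loop of startswith checks with slicing, plus a whole-string replace) by a single left-to-right character scan with a three-state accumulator (head / verbatim / underscore-to-space) that decides at the first underscore via one set lookup.
import Mathlib
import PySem

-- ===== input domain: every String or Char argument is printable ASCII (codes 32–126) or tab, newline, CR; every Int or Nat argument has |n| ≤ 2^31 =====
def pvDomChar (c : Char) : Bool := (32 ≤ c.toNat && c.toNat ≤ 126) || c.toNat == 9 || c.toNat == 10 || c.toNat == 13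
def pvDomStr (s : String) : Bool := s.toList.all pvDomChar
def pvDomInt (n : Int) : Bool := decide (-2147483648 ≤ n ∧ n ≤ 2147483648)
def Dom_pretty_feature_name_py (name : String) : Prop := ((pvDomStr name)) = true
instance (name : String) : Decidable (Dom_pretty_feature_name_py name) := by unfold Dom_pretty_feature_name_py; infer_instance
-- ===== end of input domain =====

-- B replaces A's staged passes (loop of startswith checks + slicing + a whole-string replace) by
-- ONE left-to-right character scan with a three-state accumulator; objective: alternative, same value.

-- ===== PORT A =====
-- the literal list of field names A's for-loop iterates over
def pvAFields : List (List Char) :=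
  ["StoreType".toList, "Assortment".toList, "StateHoliday".toList, "PromoInterval".toList, "Store".toList]

-- A's for-loop with early return: try each field name in order
def pvALoop (core : List Char) : List (List Char) → List Char
  | [] => PySem.Chars.replace core "_".toList " ".toList
  | f :: rest =>
    if PySem.Chars.startswith core (f ++ ['_']) then
      f ++ " = ".toList ++ PySem.List.slice core (some ((f ++ ['_']).length : Int)) none
    else pvALoop core rest

def pretty_feature_name_py (name : String) : String :=
  let cs := name.toList
  let core :=
    if PySem.Chars.startswith cs "num__".toList then PySem.List.slice cs (some 5) none
    else if PySem.Chars.startswith cs "cat__".toList then PySem.List.slice cs (some 5) none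
    else cs
  String.ofList (pvALoop core pvAFields)

-- ===== PORT B =====
-- B's set of field names
def pvBFields : PySem.Set (List Char) :=
  PySem.Set.ofList ["StoreType".toList, "Assortment".toList, "StateHoliday".toList, "PromoInterval".toList, "Store".toList]

-- mode 1 of B's state machine: append each remaining char verbatim
def pvBVerb : List Char → List Char
  | [] => []
  | c :: r => c :: pvBVerb r

-- mode 2 of B's state machine: append each char, turning '_' into ' '
def pvBSpaces : List Char → List Char
  | [] => []
  | c :: r => (if c = '_' then ' ' else c) :: pvBSpaces r

-- mode 0: accumulate the head (reversed); at the first '_' decide with one set lookup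
def pvBHead (acc : List Char) : List Char → List Char
  | [] => acc.reverse
  | c :: r =>
    if c = '_' then
      if acc.reverse ∈ pvBFields then acc.reverse ++ " = ".toList ++ pvBVerb r
      else acc.reverse ++ ' ' :: pvBSpaces r
    else pvBHead (c :: acc) r

def pretty_feature_name_py_alt (name : String) : String :=
  let cs := name.toList
  let core := if cs.take 5 = "num__".toList ∨ cs.take 5 = "cat__".toList then cs.drop 5 else cs
  String.ofList (pvBHead [] core)

-- ===== PRECONDITION & SPEC =====
def Spec_pretty_feature_name_py (name : String) (out : String) : Prop := out = pretty_feature_name_py_alt name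
instance (name : String) (out : String) : Decidable (Spec_pretty_feature_name_py name out) := by unfold Spec_pretty_feature_name_py; infer_instance

-- ===== CLAIM (what is proved, stated in full; the proofs are below) =====
def Claim_equal_pretty_feature_name_py : Prop := ∀ (name : String), Dom_pretty_feature_name_py name → Spec_pretty_feature_name_py name (pretty_feature_name_py name)

-- ===== LEMMAS AND PROOFS =====

-- the single-character substitution B's mode 2 performs
def pvSub (c : Char) : Char := if c = '_' then ' ' else c

theorem pvBVerb_eq (l : List Char) : pvBVerb l = l := by
  induction l with
  | nil => rfl
  | cons c r ih => simp [pvBVerb, ih]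

theorem pvBSpaces_eq (l : List Char) : pvBSpaces l = l.map pvSub := by
  induction l with
  | nil => rfl
  | cons c r ih => simp [pvBSpaces, pvSub, ih]

-- Python's replace with a one-char pattern is a character map
theorem pvReplaceGo (l : List Char) : ∀ (fuel : Nat) (acc : List Char), l.length ≤ fuel →
    PySem.Chars.replace.go ['_'] [' '] fuel l acc = acc.reverse ++ l.map pvSub := by
  induction l with
  | nil =>
    intro fuel acc _
    cases fuel <;> simp [PySem.Chars.replace.go]
  | cons c r ih =>
    intro fuel acc hf
    cases fuel with
    | zero => simp at hf
    | succ n =>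
      have hn : r.length ≤ n := by simpa using hf
      by_cases hc : c = '_'
      · subst hc
        rw [show PySem.Chars.replace.go ['_'] [' '] (n+1) ('_' :: r) acc
              = PySem.Chars.replace.go ['_'] [' '] n r (' ' :: acc) by
            simp [PySem.Chars.replace.go, List.isPrefixOf]]
        rw [ih n (' ' :: acc) hn]
        simp [pvSub]
      · have hbe : ('_' == c) = false := by
          simp [Ne.symm hc]
        rw [show PySem.Chars.replace.go ['_'] [' '] (n+1) (c :: r) acc
              = PySem.Chars.replace.go ['_'] [' '] n r (c :: acc) by
            simp [PySem.Chars.replace.go, List.isPrefixOf, hbe]]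
        rw [ih n (c :: acc) hn]
        simp [pvSub, hc]

theorem pvReplace_eq_map (l : List Char) :
    PySem.Chars.replace l "_".toList " ".toList = l.map pvSub := by
  have : PySem.Chars.replace l "_".toList " ".toList
      = PySem.Chars.replace.go ['_'] [' '] l.length l [] := by
    simp [PySem.Chars.replace]
  rw [this, pvReplaceGo l l.length [] le_rfl]
  simp

theorem pvMap_id_of_no_us (l : List Char) (h : '_' ∉ l) : l.map pvSub = l := by
  induction l with
  | nil => rfl
  | cons c r ih =>
    have hc : c ≠ '_' := fun e => h (by simp [e])
    simp [pvSub, hc, ih (fun m => h (List.mem_cons_of_mem _ m))]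

-- B's mode 0 on an underscore-free tail just returns the accumulated head
theorem pvBHead_no (l : List Char) : ∀ acc, '_' ∉ l → pvBHead acc l = acc.reverse ++ l := by
  induction l with
  | nil => intro acc _; simp [pvBHead]
  | cons c r ih =>
    intro acc h
    have hc : c ≠ '_' := fun e => h (by simp [e])
    rw [show pvBHead acc (c :: r) = pvBHead (c :: acc) r by simp [pvBHead, hc]]
    rw [ih (c :: acc) (fun m => h (List.mem_cons_of_mem _ m))]
    simp

-- B's mode 0 across the head up to the first underscore
theorem pvBHead_sep (h : List Char) : ∀ (acc t : List Char), '_' ∉ h →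
    pvBHead acc (h ++ '_' :: t) =
      if (acc.reverse ++ h) ∈ pvBFields then (acc.reverse ++ h) ++ " = ".toList ++ pvBVerb t
      else (acc.reverse ++ h) ++ ' ' :: pvBSpaces t := by
  induction h with
  | nil =>
    intro acc t _
    simp [pvBHead]
  | cons c h' ih =>
    intro acc t hm
    have hc : c ≠ '_' := fun e => hm (by simp [e])
    rw [show pvBHead acc ((c :: h') ++ '_' :: t) = pvBHead (c :: acc) (h' ++ '_' :: t) by
          simp [pvBHead, hc]]
    rw [ih (c :: acc) t (fun m => hm (List.mem_cons_of_mem _ m))]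
    simp

-- A-side: split core at its first underscore (none if there is none)
def pvSplitUs : List Char → Option (List Char × List Char)
  | [] => none
  | c :: rest =>
    if c = '_' then some ([], rest)
    else match pvSplitUs rest with
         | none => none
         | some (h, t) => some (c :: h, t)

theorem pvSplitUs_none_iff (cs : List Char) : pvSplitUs cs = none ↔ '_' ∉ cs := by
  induction cs with
  | nil => simp [pvSplitUs]
  | cons c rest ih =>
    by_cases hc : c = '_'
    · subst hc; simp [pvSplitUs]
    · cases h : pvSplitUs rest with
      | none =>
        have hrest : '_' ∉ rest := ih.mp h
        simp [pvSplitUs, hc, h, List.mem_cons, hrest, Ne.symm hc]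
      | some p =>
        have hrest : '_' ∈ rest := by
          by_contra hn
          rw [← ih] at hn
          simp [hn] at h
        obtain ⟨h1, t1⟩ := p
        simp [pvSplitUs, hc, h, List.mem_cons, hrest]

theorem pvSplitUs_some (cs h t : List Char) (hp : pvSplitUs cs = some (h, t)) :
    '_' ∉ h ∧ cs = h ++ '_' :: t := by
  induction cs generalizing h t with
  | nil => simp [pvSplitUs] at hp
  | cons c rest ih =>
    by_cases hc : c = '_'
    · subst hc
      simp [pvSplitUs] at hp
      obtain ⟨rfl, rfl⟩ := hp
      simp
    · cases hrec : pvSplitUs rest with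
      | none => simp [pvSplitUs, hc, hrec] at hp
      | some p =>
        obtain ⟨h', t'⟩ := p
        simp [pvSplitUs, hc, hrec] at hp
        obtain ⟨rfl, rfl⟩ := hp
        obtain ⟨hmem, rfl⟩ := ih h' t' hrec
        exact ⟨by simp [List.mem_cons, Ne.symm hc, hmem], rfl⟩

-- if core has no underscore, every startswith in A's loop fails and it falls through to replace
theorem pvALoop_no_sep (core : List Char) (h : '_' ∉ core) (fs : List (List Char)) :
    pvALoop core fs = PySem.Chars.replace core "_".toList " ".toList := by
  induction fs with
  | nil => rfl
  | cons f rest ih =>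
    simp only [pvALoop]
    rw [if_neg, ih]
    intro hsw
    have hpre : (f ++ ['_']) <+: core := (PySem.Chars.startswith_iff _ _).mp hsw
    exact h (hpre.subset (by simp))

-- two underscore-free heads followed by '_' determine each other
theorem pvSepInj (f h u t : List Char) (hf : '_' ∉ f) (hh : '_' ∉ h)
    (e : f ++ '_' :: u = h ++ '_' :: t) : f = h := by
  induction f generalizing h with
  | nil =>
    cases h with
    | nil => rfl
    | cons d h' =>
      simp only [List.nil_append, List.cons_append, List.cons.injEq] at e
      exact absurd (List.mem_cons.mpr (Or.inl e.1)) hh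
  | cons c f' ih =>
    cases h with
    | nil =>
      simp only [List.cons_append, List.nil_append, List.cons.injEq] at e
      exact absurd (List.mem_cons.mpr (Or.inl e.1.symm)) hf
    | cons d h' =>
      simp only [List.cons_append, List.cons.injEq] at e
      obtain ⟨rfl, e2⟩ := e
      rw [ih h' (fun m => hf (List.mem_cons_of_mem _ m)) (fun m => hh (List.mem_cons_of_mem _ m)) e2]

theorem pvStartswith_sep_iff (f h t : List Char) (hf : '_' ∉ f) (hh : '_' ∉ h) :
    PySem.Chars.startswith (h ++ '_' :: t) (f ++ ['_']) = true ↔ f = h := by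
  rw [PySem.Chars.startswith_iff]
  constructor
  · rintro ⟨u, hu⟩
    rw [List.append_assoc] at hu
    exact pvSepInj f h (u) t hf hh (by simpa using hu)
  · rintro rfl
    exact ⟨t, by simp⟩

-- A's loop on a core of the form h ++ '_' :: t with '_'-free h is a membership test on the field list
theorem pvALoop_sep (h t : List Char) (hh : '_' ∉ h) (fs : List (List Char))
    (hfs : ∀ f ∈ fs, '_' ∉ f) :
    pvALoop (h ++ '_' :: t) fs =
      if h ∈ fs then h ++ " = ".toList ++ t
      else PySem.Chars.replace (h ++ '_' :: t) "_".toList " ".toList := by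
  induction fs with
  | nil => simp [pvALoop]
  | cons f rest ih =>
    have hf : '_' ∉ f := hfs f List.mem_cons_self
    by_cases hfh : f = h
    · subst hfh
      simp only [pvALoop]
      rw [if_pos ((pvStartswith_sep_iff f f t hf hf).mpr rfl)]
      have h0 : (0 : Int) ≤ ((f ++ ['_']).length : Int) := by positivity
      rw [PySem.List.slice_from _ h0, if_pos (List.mem_cons_self)]
      rw [show f ++ '_' :: t = (f ++ ['_']) ++ t by simp, Int.toNat_natCast, List.drop_left]
    · simp only [pvALoop]
      rw [if_neg (by rw [pvStartswith_sep_iff f h t hf hh]; exact hfh),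
          ih (fun g m => hfs g (List.mem_cons_of_mem _ m))]
      have hne : ¬ (h = f) := fun e => hfh e.symm
      simp [List.mem_cons, hne]

-- ===== VERDICT (by name: the statement is the Claim_ definition above) =====
theorem pretty_feature_name_py_spec : Claim_equal_pretty_feature_name_py := by
  intro name _
  unfold Spec_pretty_feature_name_py pretty_feature_name_py pretty_feature_name_py_alt
  simp only
  have hsw : ∀ p : List Char, PySem.Chars.startswith name.toList p = true ↔
      name.toList.take p.length = p := by
    intro p
    rw [PySem.Chars.startswith_iff, List.prefix_iff_eq_take]
    exact eq_comm
  have hslice : PySem.List.slice name.toList (some 5) none = name.toList.drop 5 := by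
    rw [PySem.List.slice_from _ (by norm_num : (0:Int) ≤ 5)]; rfl
  have hcore :
      (if PySem.Chars.startswith name.toList "num__".toList then PySem.List.slice name.toList (some 5) none
       else if PySem.Chars.startswith name.toList "cat__".toList then PySem.List.slice name.toList (some 5) none
       else name.toList)
      = (if name.toList.take 5 = "num__".toList ∨ name.toList.take 5 = "cat__".toList
         then name.toList.drop 5 else name.toList) := by
    have l1 : ("num__".toList).length = 5 := rfl
    have l2 : ("cat__".toList).length = 5 := rfl
    by_cases h1 : name.toList.take 5 = "num__".toList
    · rw [if_pos ((hsw _).mpr (by rw [l1]; exact h1)), if_pos (Or.inl h1), hslice]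
    · rw [if_neg (by rw [hsw, l1]; exact h1)]
      by_cases h2 : name.toList.take 5 = "cat__".toList
      · rw [if_pos ((hsw _).mpr (by rw [l2]; exact h2)), if_pos (Or.inr h2), hslice]
      · rw [if_neg (by rw [hsw, l2]; exact h2), if_neg (by tauto)]
  rw [hcore]
  generalize (if name.toList.take 5 = "num__".toList ∨ name.toList.take 5 = "cat__".toList
              then name.toList.drop 5 else name.toList) = core
  cases hp : pvSplitUs core with
  | none =>
    have hno : '_' ∉ core := (pvSplitUs_none_iff core).mp hp
    rw [pvALoop_no_sep core hno, pvBHead_no core [] hno,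
        pvReplace_eq_map, pvMap_id_of_no_us core hno]
    rfl
  | some p =>
    obtain ⟨h, t⟩ := p
    obtain ⟨hh, rfl⟩ := pvSplitUs_some core h t hp
    rw [pvALoop_sep h t hh pvAFields (by decide), pvBHead_sep h [] t hh]
    have hmem : (h ∈ pvBFields) ↔ h ∈ pvAFields := by
      rw [pvBFields, PySem.Set.mem_ofList]; exact Iff.rfl
    simp only [List.reverse_nil, List.nil_append]
    by_cases hm : h ∈ pvAFields
    · rw [if_pos hm, if_pos (hmem.mpr hm), pvBVerb_eq]
    · rw [if_neg hm, if_neg (fun hx => hm (hmem.mp hx)),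
          pvReplace_eq_map, pvBSpaces_eq]
      have : ('_' :: t).map pvSub = ' ' :: t.map pvSub := by simp [pvSub]
      rw [List.map_append, this, pvMap_id_of_no_us h hh]
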